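-- pv_equiv track=rewrite | github.com/steveya/trellis | trellis/models/trees/algebra.py | _product_binomial_2f_parent_indices
-- ===== SOURCE A (Python) =====
-- def _product_binomial_2f_parent_indices(step: int, node: int) -> tuple[int, ...]:
--     if step <= 0:
--         return ()
--     width = int(step) + 1
--     i, j = divmod(int(node), width)
--     prev_width = width - 1
--     parents: list[int] = []
--     for di in (0, 1):
--         for dj in (0, 1):
--             parent_i = i - di
--             parent_j = j - dj
--             if 0 <= parent_i < prev_width and 0 <= parent_j < prev_width:
--                 parents.append(parent_i * prev_width + parent_j)
--     return tuple(sorted(set(parents)))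
-- ===== SOURCE B (Python) =====
-- def _product_binomial_2f_parent_indices(step: int, node: int) -> tuple[int, ...]:
--     if step <= 0:
--         return ()
--     width = int(step) + 1
--     i, j = divmod(int(node), width)
--     pw = width - 1
--     # valid parent rows/cols form a clamped interval; index its rectangle by a flat counter
--     r0, r1 = max(i - 1, 0), min(i, pw - 1)
--     c0, c1 = max(j - 1, 0), min(j, pw - 1)
--     nr, nc = r1 - r0 + 1, c1 - c0 + 1
--     if nr <= 0 or nc <= 0:
--         return ()
--     return tuple((r0 + k // nc) * pw + (c0 + k % nc) for k in range(nr * nc))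
-- ===== Notes on version B (the rewrite author's own statement) =====
-- stated objective: alternative
-- what changed: Instead of enumerating the 2x2 candidate offsets with bounds checks and then deduplicating/sorting, B computes the clamped rectangle of valid parent rows/columns analytically (max/min interval bounds) and emits its cells by a single flat counter with divmod index arithmetic, so no candidate filtering, no set() and no sorted() occur.
import Mathlib
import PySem

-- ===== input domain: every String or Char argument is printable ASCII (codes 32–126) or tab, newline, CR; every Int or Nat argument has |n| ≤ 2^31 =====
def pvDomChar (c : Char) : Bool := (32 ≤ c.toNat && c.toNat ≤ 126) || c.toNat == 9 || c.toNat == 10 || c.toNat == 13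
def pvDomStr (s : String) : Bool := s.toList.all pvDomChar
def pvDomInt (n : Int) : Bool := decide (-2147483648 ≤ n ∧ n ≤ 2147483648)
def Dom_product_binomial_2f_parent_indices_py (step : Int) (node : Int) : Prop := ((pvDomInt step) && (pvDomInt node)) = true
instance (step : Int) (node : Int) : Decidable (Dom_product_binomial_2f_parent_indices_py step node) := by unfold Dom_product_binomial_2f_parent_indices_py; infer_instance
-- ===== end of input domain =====

-- B replaces the 2x2 offset enumeration with bounds checks + sorted(set(...)) by an
-- analytic clamped rectangle of valid rows/columns, indexed by one flat counter (alternative).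

-- ===== PORT A =====
def product_binomial_2f_parent_indices_py (step : Int) (node : Int) : List Int :=
  if step ≤ 0 then []
  else
    let width := step + 1
    let i := PySem.Int.floordiv node width
    let j := PySem.Int.mod node width
    let prev := width - 1
    let parents : List Int :=
      [(0 : Int), 1].foldl (fun acc di =>
        [(0 : Int), 1].foldl (fun acc dj =>
          let pi := i - di
          let pj := j - dj
          if (0 ≤ pi ∧ pi < prev) ∧ (0 ≤ pj ∧ pj < prev) then acc ++ [pi * prev + pj]
          else acc) acc) []
    PySem.List.sorted (PySem.Set.ofList parents) (fun x => x) false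

-- ===== PORT B =====
def product_binomial_2f_parent_indices_py_alt (step : Int) (node : Int) : List Int :=
  if step ≤ 0 then []
  else
    let width := step + 1
    let i := PySem.Int.floordiv node width
    let j := PySem.Int.mod node width
    let pw := width - 1
    let r0 := max (i - 1) 0
    let r1 := min i (pw - 1)
    let c0 := max (j - 1) 0
    let c1 := min j (pw - 1)
    let nr := r1 - r0 + 1
    let nc := c1 - c0 + 1
    if nr ≤ 0 ∨ nc ≤ 0 then []
    else (PySem.List.pyRange 0 (nr * nc) 1).map
      (fun k => (r0 + PySem.Int.floordiv k nc) * pw + (c0 + PySem.Int.mod k nc))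

-- ===== PRECONDITION & SPEC =====
def Spec_product_binomial_2f_parent_indices_py (step : Int) (node : Int) (out : List Int) : Prop := out = product_binomial_2f_parent_indices_py_alt step node
instance (step : Int) (node : Int) (out : List Int) : Decidable (Spec_product_binomial_2f_parent_indices_py step node out) := by unfold Spec_product_binomial_2f_parent_indices_py; infer_instance

-- ===== CLAIM (what is proved, stated in full; the proofs are below) =====
def Claim_equal_product_binomial_2f_parent_indices_py : Prop := ∀ (step : Int) (node : Int), Dom_product_binomial_2f_parent_indices_py step node → Spec_product_binomial_2f_parent_indices_py step node (product_binomial_2f_parent_indices_py step node)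

-- ===== LEMMAS AND PROOFS =====

-- sorted(set(m)) = l when m is the reverse of a strictly increasing l
theorem pv_sorted_ofList_reverse (l m : List Int) (hm : m = l.reverse)
    (h : l.Pairwise (· < ·)) :
    PySem.List.sorted (PySem.Set.ofList m) (fun x => x) false = l := by
  subst hm
  have hnd : l.reverse.Nodup :=
    List.nodup_reverse.mpr (h.imp (fun {a b} hab => ne_of_lt hab))
  rw [PySem.Set.ofList_eq_self_of_nodup _ hnd]
  exact PySem.List.sorted_eq_of_perm_of_pairwise_lt _ _ _ (List.reverse_perm l).symm h

-- ===== VERDICT (by name: the statement is the Claim_ definition above) =====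
set_option maxHeartbeats 1600000 in
theorem product_binomial_2f_parent_indices_py_spec : Claim_equal_product_binomial_2f_parent_indices_py := by
  intro step node _
  unfold Spec_product_binomial_2f_parent_indices_py
  unfold product_binomial_2f_parent_indices_py product_binomial_2f_parent_indices_py_alt
  by_cases hs : step ≤ 0
  · simp [hs]
  · have hw : (0 : Int) < step + 1 := by omega
    simp only [if_neg hs, List.foldl, List.nil_append, sub_zero]
    have hj0 : 0 ≤ PySem.Int.mod node (step + 1) := by
      rw [PySem.Int.mod_eq_emod_of_pos hw]; exact Int.emod_nonneg node (by omega)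
    have hj1 : PySem.Int.mod node (step + 1) < step + 1 := by
      rw [PySem.Int.mod_eq_emod_of_pos hw]; exact Int.emod_lt_of_pos node hw
    set i := PySem.Int.floordiv node (step + 1) with hi
    set j := PySem.Int.mod node (step + 1) with hj
    by_cases hr1 : (0 ≤ i - 1 ∧ i - 1 < step + 1 - 1) <;>
      by_cases hr0 : (0 ≤ i ∧ i < step + 1 - 1) <;>
      by_cases hc1 : (0 ≤ j - 1 ∧ j - 1 < step + 1 - 1) <;>
      by_cases hc0 : (0 ≤ j ∧ j < step + 1 - 1) <;>
      simp only [hr1, hr0, hc1, hc0, and_true, and_false, and_self, if_true, if_false, List.nil_append, List.cons_append] <;>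
      first
      | (rw [if_pos (by omega)]
         exact pv_sorted_ofList_reverse [] [] rfl List.Pairwise.nil)
      | (rw [if_neg (by omega)]
         first
         | rw [show min j (step + 1 - 1 - 1) - max (j - 1) 0 + 1 = 2 from by omega]
         | rw [show min j (step + 1 - 1 - 1) - max (j - 1) 0 + 1 = 1 from by omega]
         first
         | rw [show min i (step + 1 - 1 - 1) - max (i - 1) 0 + 1 = 2 from by omega]
         | rw [show min i (step + 1 - 1 - 1) - max (i - 1) 0 + 1 = 1 from by omega]
         first
         | rw [show max (i - 1) 0 = i - 1 from by omega]
         | rw [show max (i - 1) 0 = i from by omega]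
         first
         | rw [show max (j - 1) 0 = j - 1 from by omega]
         | rw [show max (j - 1) 0 = j from by omega]
         first
         | rw [show PySem.List.pyRange 0 (2 * 2) 1 = [0, 1, 2, 3] from by decide]
         | rw [show PySem.List.pyRange 0 (2 * 1) 1 = [0, 1] from by decide]
         | rw [show PySem.List.pyRange 0 (1 * 2) 1 = [0, 1] from by decide]
         | rw [show PySem.List.pyRange 0 (1 * 1) 1 = [0] from by decide]
         simp only [List.map,
           show PySem.Int.floordiv 0 2 = 0 from by decide,
           show PySem.Int.floordiv 1 2 = 0 from by decide,
           show PySem.Int.floordiv 2 2 = 1 from by decide,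
           show PySem.Int.floordiv 3 2 = 1 from by decide,
           show PySem.Int.floordiv 0 1 = 0 from by decide,
           show PySem.Int.floordiv 1 1 = 1 from by decide,
           show PySem.Int.mod 0 2 = 0 from by decide,
           show PySem.Int.mod 1 2 = 1 from by decide,
           show PySem.Int.mod 2 2 = 0 from by decide,
           show PySem.Int.mod 3 2 = 1 from by decide,
           show PySem.Int.mod 0 1 = 0 from by decide,
           show PySem.Int.mod 1 1 = 0 from by decide]
         refine pv_sorted_ofList_reverse _ _ ?_ ?_
         · simp
         · simp [List.pairwise_cons] <;> (repeat' apply And.intro) <;>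
             linarith [(show i * step - (i - 1) * step = step from by ring),
               (show (2 : ℤ) ≤ step from by omega)])
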